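-- pv_equiv track=rewrite | github.com/CptCookie/AOC | Python/Year2022/Day10/solution.py | calc_timeline
-- ===== SOURCE A (Python) =====
-- def calc_timeline(instr):
--     register = [1]
--     for i in instr:
--         if i[0] == "noop":
--             register.append(register[-1])
--         elif i[0] == "addx":
--             register.append(register[-1])
--             register.append(register[-1] + int(i[1]))
--         else:
--             raise AttributeError("Unknown op code")
--     return register
-- ===== SOURCE B (Python) =====
-- def _deltas(i):
--     if i[0] == "noop":
--         return [0]
--     if i[0] == "addx":
--         return [0, int(i[1])]
--     raise AttributeError("Unknown op code")
--
--
-- def calc_timeline(instr):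
--     # build the list of per-cycle register increments, seeded with the start value 1
--     deltas = [1]
--     for i in instr:
--         deltas.extend(_deltas(i))
--     # the timeline is the running prefix sum of the deltas
--     total = 0
--     timeline = []
--     for d in deltas:
--         total += d
--         timeline.append(total)
--     return timeline
-- ===== Notes on version B (the rewrite author's own statement) =====
-- stated objective: alternative
-- what changed: B builds a per-cycle delta list (0 for noop, 0 then the addx operand) and reconstructs the timeline as a running prefix sum, instead of repeatedly appending register[-1]-based values.
import Mathlib
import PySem

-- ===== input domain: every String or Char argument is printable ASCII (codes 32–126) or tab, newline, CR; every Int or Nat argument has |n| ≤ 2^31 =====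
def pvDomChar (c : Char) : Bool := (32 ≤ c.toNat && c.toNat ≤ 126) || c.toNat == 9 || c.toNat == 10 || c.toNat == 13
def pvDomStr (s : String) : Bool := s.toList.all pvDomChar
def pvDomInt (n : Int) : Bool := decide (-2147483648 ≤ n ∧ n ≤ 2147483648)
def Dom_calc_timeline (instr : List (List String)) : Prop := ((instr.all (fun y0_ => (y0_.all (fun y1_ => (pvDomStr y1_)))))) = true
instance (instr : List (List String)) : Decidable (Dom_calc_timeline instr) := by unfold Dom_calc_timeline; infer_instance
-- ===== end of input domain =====

-- B replaces A's append-register[-1] loop by a delta-list + prefix-sum decomposition (alternative, same cost).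
-- ===== PORT A =====
def stepA (register : List Int) (i : List String) : List Int :=
  match PySem.List.pyGet? i 0 with
  | none => register  -- i[0] raises IndexError; excluded by Pre_
  | some op =>
    if op = "noop" then
      register ++ [(PySem.List.pyGet? register (-1)).getD 0]
    else if op = "addx" then
      let r1 := register ++ [(PySem.List.pyGet? register (-1)).getD 0]
      r1 ++ [((PySem.List.pyGet? r1 (-1)).getD 0) +
             (((PySem.List.pyGet? i 1).bind PySem.Int.ofStr?).getD 0)]
    else register  -- AttributeError; excluded by Pre_

def calc_timeline (instr : List (List String)) : List Int :=
  instr.foldl stepA [1]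

-- ===== PORT B =====
def deltasOf (i : List String) : List Int :=
  match PySem.List.pyGet? i 0 with
  | none => []  -- IndexError; excluded by Pre_
  | some op =>
    if op = "noop" then [0]
    else if op = "addx" then
      [0, (((PySem.List.pyGet? i 1).bind PySem.Int.ofStr?).getD 0)]
    else []  -- AttributeError; excluded by Pre_

-- running prefix sum (the second loop of Source B)
def accumulateFrom (total : Int) : List Int → List Int
  | [] => []
  | d :: ds => (total + d) :: accumulateFrom (total + d) ds

def calc_timeline_alt (instr : List (List String)) : List Int :=
  accumulateFrom 0 (instr.foldl (fun acc i => acc ++ deltasOf i) [1])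

-- ===== PRECONDITION & SPEC =====
-- Pre_ excludes exactly the inputs where A raises: an empty instruction (IndexError),
-- an unknown op code (AttributeError), or an addx whose operand is missing (IndexError)
-- or not a valid int literal (ValueError).
def Pre_calc_timeline (instr : List (List String)) : Prop :=
  ∀ i ∈ instr,
    PySem.List.pyGet? i 0 = some "noop" ∨
    (PySem.List.pyGet? i 0 = some "addx" ∧
      ((PySem.List.pyGet? i 1).bind PySem.Int.ofStr?).isSome = true)

instance (instr : List (List String)) : Decidable (Pre_calc_timeline instr) := by
  unfold Pre_calc_timeline; infer_instance

def pvWitness_calc_timeline : List (List String) := [["noop"], ["addx", "3"], ["addx", "-5"]]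

def Spec_calc_timeline (instr : List (List String)) (out : List Int) : Prop := out = calc_timeline_alt instr
instance (instr : List (List String)) (out : List Int) : Decidable (Spec_calc_timeline instr out) := by unfold Spec_calc_timeline; infer_instance

-- ===== CLAIM (what is proved, stated in full; the proofs are below) =====
def Claim_equal_calc_timeline : Prop := ∀ (instr : List (List String)), Dom_calc_timeline instr → Pre_calc_timeline instr → Spec_calc_timeline instr (calc_timeline instr)

-- ===== LEMMAS AND PROOFS =====
theorem accumulateFrom_append (t : Int) (ds es : List Int) :
    accumulateFrom t (ds ++ es) = accumulateFrom t ds ++ accumulateFrom (t + ds.sum) es := by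
  induction ds generalizing t with
  | nil => simp [accumulateFrom]
  | cons d ds ih => simp [accumulateFrom, ih, add_assoc]

theorem accumulateFrom_ne_nil (t : Int) (ds : List Int) (h : ds ≠ []) :
    accumulateFrom t ds ≠ [] := by
  cases ds with
  | nil => exact absurd rfl h
  | cons d ds => simp [accumulateFrom]

theorem getLast?_cons_of_ne (a : Int) (l : List Int) (h : l ≠ []) :
    (a :: l).getLast? = l.getLast? := by
  cases l with
  | nil => exact absurd rfl h
  | cons b bs => simp

theorem getLast?_accumulateFrom (t : Int) (ds : List Int) (h : ds ≠ []) :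
    (accumulateFrom t ds).getLast? = some (t + ds.sum) := by
  induction ds generalizing t with
  | nil => exact absurd rfl h
  | cons d ds ih =>
    cases ds with
    | nil => simp [accumulateFrom]
    | cons e es =>
      rw [accumulateFrom, getLast?_cons_of_ne _ _ (accumulateFrom_ne_nil _ _ (by simp)),
        ih _ (by simp)]
      simp [add_assoc]

theorem stepA_eq (d : List Int) (hd : d ≠ []) (i : List String)
    (hi : PySem.List.pyGet? i 0 = some "noop" ∨
      (PySem.List.pyGet? i 0 = some "addx" ∧
        ((PySem.List.pyGet? i 1).bind PySem.Int.ofStr?).isSome = true)) :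
    stepA (accumulateFrom 0 d) i = accumulateFrom 0 (d ++ deltasOf i) := by
  have hlast : (PySem.List.pyGet? (accumulateFrom 0 d) (-1)).getD 0 = d.sum := by
    rw [PySem.List.pyGet?_neg_one, getLast?_accumulateFrom _ _ hd]
    simp
  rcases hi with h | ⟨h, _⟩
  · rw [stepA, deltasOf, h]
    simp only [reduceIte, accumulateFrom_append, hlast]
    simp [accumulateFrom]
  · rw [stepA, deltasOf, h]
    simp only [String.reduceEq, reduceIte, accumulateFrom_append, hlast,
      PySem.List.pyGet?_neg_one_append_singleton, Option.getD_some]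
    simp [accumulateFrom]

theorem foldl_eq (instr : List (List String)) (d : List Int) (hd : d ≠ [])
    (h : Pre_calc_timeline instr) :
    instr.foldl stepA (accumulateFrom 0 d) =
      accumulateFrom 0 (instr.foldl (fun acc i => acc ++ deltasOf i) d) := by
  induction instr generalizing d with
  | nil => rfl
  | cons i is ih =>
    simp only [List.foldl_cons]
    rw [stepA_eq d hd i (h i (by simp))]
    exact ih (d ++ deltasOf i) (by simp [hd]) (fun j hj => h j (by simp [hj]))

-- ===== VERDICT (by name: the statement is the Claim_ definition above) =====
theorem calc_timeline_spec : Claim_equal_calc_timeline := by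
  intro instr _ hpre
  show calc_timeline instr = calc_timeline_alt instr
  rw [calc_timeline, calc_timeline_alt]
  conv_lhs => rw [show ([1] : List Int) = accumulateFrom 0 [1] by simp [accumulateFrom]]
  exact foldl_eq instr [1] (by simp) hpre
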